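-- pv_equiv track=rewrite | github.com/terabhaicoder/applysurge | backend/worker/scrapers/startup_discovery.py | _determine_industry_from_tags
-- ===== SOURCE A (Python) =====
-- from typing import Any, Dict, List, Optional, Set
--
-- def _determine_industry_from_tags(tags: List[str]) -> Optional[str]:
--     """Determine industry from technology/skill tags."""
--     industry_signals = {
--         "fintech": ["finance", "banking", "payments", "fintech", "crypto", "blockchain"],
--         "healthtech": ["health", "medical", "healthcare", "biotech", "pharma"],
--         "edtech": ["education", "learning", "edtech", "e-learning"],
--         "saas": ["saas", "b2b", "enterprise"],
--         "e-commerce": ["ecommerce", "e-commerce", "retail", "marketplace"],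
--         "ai_ml": ["machine learning", "ai", "artificial intelligence", "nlp", "deep learning"],
--         "devtools": ["developer tools", "devops", "infrastructure", "api"],
--         "cybersecurity": ["security", "cybersecurity", "infosec"],
--         "climate": ["climate", "cleantech", "sustainability", "energy"],
--         "social": ["social", "community", "messaging", "communication"],
--     }
--
--     tags_lower = [t.lower() for t in tags]
--     for industry, signals in industry_signals.items():
--         for signal in signals:
--             if any(signal in tag for tag in tags_lower):
--                 return industry
--
--     return "technology"
-- ===== SOURCE B (Python) =====
-- from typing import Any, Dict, List, Optional, Set
--
-- def _determine_industry_from_tags(tags: List[str]) -> Optional[str]: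
--     """Determine industry from technology/skill tags."""
--     industry_signals = {
--         "fintech": ["finance", "banking", "payments", "fintech", "crypto", "blockchain"],
--         "healthtech": ["health", "medical", "healthcare", "biotech", "pharma"],
--         "edtech": ["education", "learning", "edtech", "e-learning"],
--         "saas": ["saas", "b2b", "enterprise"],
--         "e-commerce": ["ecommerce", "e-commerce", "retail", "marketplace"],
--         "ai_ml": ["machine learning", "ai", "artificial intelligence", "nlp", "deep learning"],
--         "devtools": ["developer tools", "devops", "infrastructure", "api"],
--         "cybersecurity": ["security", "cybersecurity", "infosec"],
--         "climate": ["climate", "cleantech", "sustainability", "energy"],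
--         "social": ["social", "community", "messaging", "communication"],
--     }
--
--     tags_lower = [t.lower() for t in tags]
--     # index pass: every signal of the whole vocabulary that occurs in some tag
--     matched = {s for signals in industry_signals.values() for s in signals
--                if any(s in tag for tag in tags_lower)}
--     # selection pass: first industry (dict order) owning a matched signal
--     for industry, signals in industry_signals.items():
--         if any(s in matched for s in signals):
--             return industry
--     return "technology"
-- ===== Notes on version B (the rewrite author's own statement) =====
-- stated objective: alternative
-- what changed: Replaces A's short-circuiting triple-nested scan (industry -> signal -> tag) with two flat passes: first build the set of all vocabulary signals occurring in any lowercased tag, then pick the first industry owning a matched signal.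
import Mathlib
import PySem

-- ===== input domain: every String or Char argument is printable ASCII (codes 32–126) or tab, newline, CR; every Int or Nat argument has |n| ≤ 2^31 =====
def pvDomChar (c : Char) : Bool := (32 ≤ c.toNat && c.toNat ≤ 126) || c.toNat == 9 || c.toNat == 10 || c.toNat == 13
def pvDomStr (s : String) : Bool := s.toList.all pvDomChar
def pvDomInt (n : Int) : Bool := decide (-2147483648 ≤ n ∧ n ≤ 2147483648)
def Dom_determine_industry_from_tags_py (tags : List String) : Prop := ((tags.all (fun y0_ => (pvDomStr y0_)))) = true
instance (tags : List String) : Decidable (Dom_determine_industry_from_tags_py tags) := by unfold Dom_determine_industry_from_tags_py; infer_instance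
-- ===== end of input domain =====

-- B replaces A's short-circuiting nested scan with an index pass (set of matched signals) plus a flat selection pass; objective: alternative decomposition, same result.

-- ===== PORT A =====
-- the industry_signals dict, in insertion order (shared vocabulary literal)
def pvIndustrySignals : List (String × List String) :=
  [("fintech", ["finance", "banking", "payments", "fintech", "crypto", "blockchain"]),
   ("healthtech", ["health", "medical", "healthcare", "biotech", "pharma"]),
   ("edtech", ["education", "learning", "edtech", "e-learning"]),
   ("saas", ["saas", "b2b", "enterprise"]),
   ("e-commerce", ["ecommerce", "e-commerce", "retail", "marketplace"]),
   ("ai_ml", ["machine learning", "ai", "artificial intelligence", "nlp", "deep learning"]),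
   ("devtools", ["developer tools", "devops", "infrastructure", "api"]),
   ("cybersecurity", ["security", "cybersecurity", "infosec"]),
   ("climate", ["climate", "cleantech", "sustainability", "energy"]),
   ("social", ["social", "community", "messaging", "communication"])]

-- inner 'for signal in signals: if any(signal in tag ...): return industry' (returns whether it fired)
def pvAInner (tagsLower : List String) : List String → Bool
  | [] => false
  | s :: rest =>
      if tagsLower.any (fun t => PySem.Str.isIn s t) then true else pvAInner tagsLower rest

-- outer 'for industry, signals in industry_signals.items(): …'
def pvALoop (tagsLower : List String) : List (String × List String) → Option String
  | [] => some "technology"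
  | (industry, signals) :: rest =>
      if pvAInner tagsLower signals then some industry else pvALoop tagsLower rest

def determine_industry_from_tags_py (tags : List String) : Option String :=
  let tagsLower := tags.map PySem.Str.lower
  pvALoop tagsLower pvIndustrySignals

-- ===== PORT B =====
-- the whole vocabulary: all signal lists of industry_signals.values(), flattened
def pvAllSignals : List String := (pvIndustrySignals.map Prod.snd).flatten

-- 'for industry, signals …: if any(s in matched for s in signals): return industry'
def pvBLoop (matched : PySem.Set String) : List (String × List String) → Option String
  | [] => some "technology"
  | (industry, signals) :: rest =>
      if signals.any (fun s => PySem.Set.contains matched s) then some industry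
      else pvBLoop matched rest

def determine_industry_from_tags_py_alt (tags : List String) : Option String :=
  let tagsLower := tags.map PySem.Str.lower
  let matched : PySem.Set String :=
    PySem.Set.ofList (pvAllSignals.filter (fun s => tagsLower.any (fun t => PySem.Str.isIn s t)))
  pvBLoop matched pvIndustrySignals

-- ===== PRECONDITION & SPEC =====
def Spec_determine_industry_from_tags_py (tags : List String) (out : Option String) : Prop := out = determine_industry_from_tags_py_alt tags
instance (tags : List String) (out : Option String) : Decidable (Spec_determine_industry_from_tags_py tags out) := by unfold Spec_determine_industry_from_tags_py; infer_instance

-- ===== CLAIM (what is proved, stated in full; the proofs are below) =====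
def Claim_equal_determine_industry_from_tags_py : Prop := ∀ (tags : List String), Dom_determine_industry_from_tags_py tags → Spec_determine_industry_from_tags_py tags (determine_industry_from_tags_py tags)

-- ===== LEMMAS AND PROOFS =====

-- pointwise-equal predicates give equal 'any'
theorem pv_any_congr {α : Type} (l : List α) (p q : α → Bool) (h : ∀ a ∈ l, p a = q a) :
    l.any p = l.any q := by
  induction l with
  | nil => rfl
  | cons a t ih =>
      simp only [List.any_cons, h a (List.mem_cons_self ..),
        ih (fun b hb => h b (List.mem_cons_of_mem _ hb))]

-- A's inner early-return loop is 'any' of the test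
theorem pvAInner_eq_any (tl : List String) (sigs : List String) :
    pvAInner tl sigs = sigs.any (fun s => tl.any (fun t => PySem.Str.isIn s t)) := by
  induction sigs with
  | nil => rfl
  | cons s rest ih =>
      simp only [pvAInner, ih, List.any_cons]
      cases h : tl.any (fun t => PySem.Str.isIn s t) <;> simp only [h, Bool.false_eq_true, if_false, if_true, Bool.false_or, Bool.true_or]

-- membership in B's matched set is exactly A's test, for vocabulary signals
theorem pv_matched_contains (tl : List String) (s : String) (hs : s ∈ pvAllSignals) :
    PySem.Set.contains
      (PySem.Set.ofList (pvAllSignals.filter (fun s => tl.any (fun t => PySem.Str.isIn s t)))) s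
      = tl.any (fun t => PySem.Str.isIn s t) := by
  by_cases h : tl.any (fun t => PySem.Str.isIn s t) = true
  · rw [h]
    rw [PySem.Set.contains_iff, PySem.Set.mem_ofList, List.mem_filter]
    exact ⟨hs, h⟩
  · simp only [Bool.not_eq_true] at h
    rw [h]
    rw [← Bool.not_eq_true, PySem.Set.contains_iff, PySem.Set.mem_ofList, List.mem_filter]
    intro ⟨_, hp⟩
    rw [h] at hp
    exact absurd hp (by simp)

-- the two loops agree whenever every signal of the traversed sublist is in the vocabulary
theorem pv_loops_eq (tl : List String) (L : List (String × List String))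
    (hL : ∀ pr ∈ L, ∀ s ∈ pr.2, s ∈ pvAllSignals) :
    pvALoop tl L =
      pvBLoop (PySem.Set.ofList (pvAllSignals.filter (fun s => tl.any (fun t => PySem.Str.isIn s t)))) L := by
  induction L with
  | nil => rfl
  | cons pr rest ih =>
      obtain ⟨ind, sigs⟩ := pr
      have hsig : sigs.any (fun s => PySem.Set.contains
          (PySem.Set.ofList (pvAllSignals.filter (fun s => tl.any (fun t => PySem.Str.isIn s t)))) s)
          = sigs.any (fun s => tl.any (fun t => PySem.Str.isIn s t)) := by
        exact pv_any_congr sigs _ _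
          (fun s hm => pv_matched_contains tl s (hL _ (List.mem_cons_self ..) s hm))
      simp only [pvALoop, pvBLoop, pvAInner_eq_any, hsig]
      rw [ih (fun pr hpr => hL pr (List.mem_cons_of_mem _ hpr))]

theorem pv_signals_sub : ∀ pr ∈ pvIndustrySignals, ∀ s ∈ pr.2, s ∈ pvAllSignals := by
  intro pr hpr s hs
  unfold pvAllSignals
  rw [List.mem_flatten]
  exact ⟨pr.2, List.mem_map.mpr ⟨pr, hpr, rfl⟩, hs⟩

-- ===== VERDICT (by name: the statement is the Claim_ definition above) =====
theorem determine_industry_from_tags_py_spec : Claim_equal_determine_industry_from_tags_py := by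
  intro tags _
  unfold Spec_determine_industry_from_tags_py determine_industry_from_tags_py determine_industry_from_tags_py_alt
  exact pv_loops_eq (tags.map PySem.Str.lower) pvIndustrySignals pv_signals_sub
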